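-- pv_equiv track=rewrite | github.com/Kasprian/knots | main.py | parse_gauss_code
-- ===== SOURCE A (Python) =====
-- def parse_gauss_code(gauss_code):
--     crossings = {}
--     for i, num in enumerate(gauss_code):
--         if abs(num) not in crossings:
--             crossings[abs(num)] = [None, None]
--         if num > 0:
--             crossings[abs(num)][0] = i
--         else:
--             crossings[abs(num)][1] = i
--     return crossings
-- ===== SOURCE B (Python) =====
-- def parse_gauss_code(gauss_code):
--     pos = {abs(n): i for i, n in enumerate(gauss_code) if n > 0}
--     neg = {abs(n): i for i, n in enumerate(gauss_code) if n <= 0}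
--     return {k: [pos.get(k), neg.get(k)]
--             for k in dict.fromkeys(abs(n) for n in gauss_code)}
-- ===== Notes on version B (the rewrite author's own statement) =====
-- stated objective: alternative
-- what changed: Replaces the single interleaved membership-test-and-mutate pass with two filtered dict comprehensions (last positive / last non-positive index per crossing) merged over the first-appearance key order.
import Mathlib
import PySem

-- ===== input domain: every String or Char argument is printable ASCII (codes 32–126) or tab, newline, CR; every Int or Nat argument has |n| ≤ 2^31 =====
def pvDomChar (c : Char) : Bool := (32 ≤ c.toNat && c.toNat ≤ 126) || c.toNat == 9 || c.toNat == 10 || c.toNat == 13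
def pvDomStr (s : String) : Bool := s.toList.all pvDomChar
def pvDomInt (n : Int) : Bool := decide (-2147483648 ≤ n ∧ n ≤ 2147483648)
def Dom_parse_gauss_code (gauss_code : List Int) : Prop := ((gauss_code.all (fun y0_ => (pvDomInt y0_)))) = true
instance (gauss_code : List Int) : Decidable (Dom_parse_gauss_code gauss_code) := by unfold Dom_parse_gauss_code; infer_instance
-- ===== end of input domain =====

-- B replaces A's single interleaved membership-test-and-mutate pass by two filtered
-- comprehensions (last positive / last non-positive index) merged over the
-- first-appearance key order (objective: alternative decomposition, same cost).

-- ===== PORT A =====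
-- one iteration of A's for-loop body (p = (i, num))
def pvAStep (d : PySem.Dict Int (List (Option Int))) (p : Int × Int) :
    PySem.Dict Int (List (Option Int)) :=
  let d1 := if d.contains |p.2| then d else d.insert |p.2| [none, none]
  if p.2 > 0 then d1.modify |p.2| [] (fun l => PySem.List.pySetD l 0 (some p.1))
  else d1.modify |p.2| [] (fun l => PySem.List.pySetD l 1 (some p.1))

def parse_gauss_code (gauss_code : List Int) : List (Int × List (Option Int)) :=
  ((PySem.List.enumerate gauss_code).foldl pvAStep PySem.Dict.empty).items

-- ===== PORT B =====
-- the two filtered dict comprehensions of Source B, as folds over enumerate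
def pvPosStep (d : PySem.Dict Int Int) (p : Int × Int) : PySem.Dict Int Int :=
  if p.2 > 0 then d.insert |p.2| p.1 else d

def pvNegStep (d : PySem.Dict Int Int) (p : Int × Int) : PySem.Dict Int Int :=
  if p.2 ≤ 0 then d.insert |p.2| p.1 else d

-- pos = {abs(n): i for i, n in enumerate(gauss_code) if n > 0}
def pvPosDict (gauss_code : List Int) : PySem.Dict Int Int :=
  (PySem.List.enumerate gauss_code).foldl pvPosStep PySem.Dict.empty

-- neg = {abs(n): i for i, n in enumerate(gauss_code) if n <= 0}
def pvNegDict (gauss_code : List Int) : PySem.Dict Int Int :=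
  (PySem.List.enumerate gauss_code).foldl pvNegStep PySem.Dict.empty

-- {k: [pos.get(k), neg.get(k)] for k in dict.fromkeys(map(abs, gauss_code))}
def parse_gauss_code_alt (gauss_code : List Int) : List (Int × List (Option Int)) :=
  ((PySem.List.dedup (gauss_code.map (fun n => |n|))).foldl
      (fun d k => d.insert k [(pvPosDict gauss_code).get? k, (pvNegDict gauss_code).get? k])
      PySem.Dict.empty).items

-- ===== PRECONDITION & SPEC =====
def Spec_parse_gauss_code (gauss_code : List Int) (out : List (Int × List (Option Int))) : Prop := out = parse_gauss_code_alt gauss_code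
instance (gauss_code : List Int) (out : List (Int × List (Option Int))) : Decidable (Spec_parse_gauss_code gauss_code out) := by unfold Spec_parse_gauss_code; infer_instance

-- ===== CLAIM (what is proved, stated in full; the proofs are below) =====
def Claim_equal_parse_gauss_code : Prop := ∀ (gauss_code : List Int), Dom_parse_gauss_code gauss_code → Spec_parse_gauss_code gauss_code (parse_gauss_code gauss_code)

-- ===== LEMMAS AND PROOFS =====

-- keys of A's dict after the loop: insertion-ordered union of old keys and |num|'s
theorem pvAStep_keys (d : PySem.Dict Int (List (Option Int))) (p : Int × Int) :
    (pvAStep d p).keys = PySem.Set.add d.keys |p.2| := by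
  simp only [pvAStep, PySem.Dict.modify]
  by_cases h : d.contains |p.2| = true
  · have hm : |p.2| ∈ d.keys := (PySem.Dict.contains_iff_mem_keys d _).mp h
    split_ifs <;>
      rw [PySem.Dict.keys_insert_of_contains _ _ h, PySem.Set.add_of_mem hm]
  · have hm : |p.2| ∉ d.keys := fun hmem => h ((PySem.Dict.contains_iff_mem_keys d _).mpr hmem)
    have h' : d.contains |p.2| = false := by simpa using h
    split_ifs <;>
      rw [PySem.Dict.keys_insert_of_contains _ _ (PySem.Dict.contains_insert_self d _ _),
        PySem.Dict.keys_insert_of_not_contains _ _ h', PySem.Set.add_of_not_mem hm]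

theorem pvAloop_keys (l : List (Int × Int)) (d : PySem.Dict Int (List (Option Int))) :
    (l.foldl pvAStep d).keys = PySem.Set.update d.keys (l.map (fun p => |p.2|)) := by
  induction l generalizing d with
  | nil => simp [PySem.Set.update_nil]
  | cons p rest ih =>
      simp only [List.foldl_cons, List.map_cons, PySem.Set.update_cons, ih, pvAStep_keys]

-- the value invariant: A's entry at k is [last positive index, last non-positive index]
theorem pvAloop_getD (l : List (Int × Int)) (k : Int)
    (d : PySem.Dict Int (List (Option Int))) (pos neg : PySem.Dict Int Int)
    (h1 : d.contains k = true → d.getD k [] = [pos.get? k, neg.get? k])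
    (h2 : d.contains k = false → pos.get? k = none ∧ neg.get? k = none) :
    ((l.foldl pvAStep d).contains k = true →
      (l.foldl pvAStep d).getD k [] =
        [(l.foldl pvPosStep pos).get? k, (l.foldl pvNegStep neg).get? k]) ∧
    ((l.foldl pvAStep d).contains k = false →
      (l.foldl pvPosStep pos).get? k = none ∧ (l.foldl pvNegStep neg).get? k = none) := by
  induction l generalizing d pos neg with
  | nil => exact ⟨h1, h2⟩
  | cons p rest ih =>
      simp only [List.foldl_cons]
      apply ih
      · -- carrying invariant (1) through one step
        intro hc
        by_cases hk : k = |p.2|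
        · subst hk
          by_cases hd : d.contains |p.2| = true
          · have hv := h1 hd
            by_cases hp : p.2 > 0
            · simp [pvAStep, PySem.Dict.modify, pvPosStep, pvNegStep, hp, hd, not_le.mpr hp,
                hv,
                PySem.List.pySetD, PySem.List.pySet?, PySem.List.pyIdx?]
            · simp [pvAStep, PySem.Dict.modify, pvPosStep, pvNegStep, hp, hd, not_lt.mp hp,
                hv,
                PySem.List.pySetD, PySem.List.pySet?, PySem.List.pyIdx?]
          · have hv := h2 (by simpa using hd)
            by_cases hp : p.2 > 0
            · simp [pvAStep, PySem.Dict.modify, pvPosStep, pvNegStep, hp, hd, not_le.mpr hp,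
                hv.1, hv.2,
                PySem.List.pySetD, PySem.List.pySet?, PySem.List.pyIdx?]
            · simp [pvAStep, PySem.Dict.modify, pvPosStep, pvNegStep, hp, hd, not_lt.mp hp,
                hv.1, hv.2,
                PySem.List.pySetD, PySem.List.pySet?, PySem.List.pyIdx?]
        · have hgd : (pvAStep d p).getD k [] = d.getD k [] := by
            simp only [pvAStep, PySem.Dict.modify]
            split_ifs <;> simp [PySem.Dict.getD_insert, hk]
          have hcc : (pvAStep d p).contains k = d.contains k := by
            simp only [pvAStep, PySem.Dict.modify]
            split_ifs <;> simp [PySem.Dict.contains_insert, hk]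
          have hpg : (pvPosStep pos p).get? k = pos.get? k := by
            unfold pvPosStep; split_ifs <;> simp [PySem.Dict.get?_insert, hk]
          have hng : (pvNegStep neg p).get? k = neg.get? k := by
            unfold pvNegStep; split_ifs <;> simp [PySem.Dict.get?_insert, hk]
          rw [hgd, hpg, hng]; exact h1 (hcc.symm.trans hc)
      · -- carrying invariant (2) through one step
        intro hc
        have hk : k ≠ |p.2| := by
          intro hkk
          have hmem : k ∈ (pvAStep d p).keys := by
            simp [pvAStep_keys, PySem.Set.mem_add, hkk]
          simp [PySem.Dict.contains_eq_decide_mem_keys, hmem] at hc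
        have hcc : (pvAStep d p).contains k = d.contains k := by
          simp only [pvAStep, PySem.Dict.modify]
          split_ifs <;> simp [PySem.Dict.contains_insert, hk]
        have hpg : (pvPosStep pos p).get? k = pos.get? k := by
          unfold pvPosStep; split_ifs <;> simp [PySem.Dict.get?_insert, hk]
        have hng : (pvNegStep neg p).get? k = neg.get? k := by
          unfold pvNegStep; split_ifs <;> simp [PySem.Dict.get?_insert, hk]
        rw [hpg, hng]; exact h2 (hcc.symm.trans hc)

-- ===== VERDICT (by name: the statement is the Claim_ definition above) =====
theorem parse_gauss_code_spec : Claim_equal_parse_gauss_code := by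
  intro xs _
  unfold Spec_parse_gauss_code parse_gauss_code parse_gauss_code_alt
  set l := PySem.List.enumerate xs with hl
  have hmap : l.map (fun p => |p.2|) = xs.map (fun n => |n|) := by
    calc l.map (fun p => |p.2|) = (l.map (·.2)).map (fun n => |n|) := by
          simp [List.map_map]
      _ = xs.map (fun n => |n|) := by rw [hl, PySem.List.map_snd_enumerate]
  have hkeys : (l.foldl pvAStep PySem.Dict.empty).keys
      = PySem.List.dedup (xs.map (fun n => |n|)) := by
    rw [pvAloop_keys, hmap]
    simp [PySem.Dict.keys_empty, PySem.Set.update_nil_left]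
  have hnd : (l.foldl pvAStep PySem.Dict.empty).keys.Nodup := by
    rw [hkeys]; exact PySem.List.nodup_dedup _
  rw [PySem.Dict.items_eq_map_keys _ hnd [], hkeys]
  rw [PySem.Dict.items_foldl_insert_fresh (k := fun a => a)
      (v := fun k => [(pvPosDict xs).get? k, (pvNegDict xs).get? k])
      (d := PySem.Dict.empty) _ (by intro a _; simp [PySem.Dict.contains_empty])
      (by simpa using PySem.List.nodup_dedup (xs.map (fun n => |n|)))]
  rw [show (PySem.Dict.empty : PySem.Dict Int (List (Option Int))).items = [] from rfl,
    List.nil_append]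
  apply List.map_congr_left
  intro k hkmem
  simp only [pvPosDict, pvNegDict, ← hl]
  have hc : (l.foldl pvAStep PySem.Dict.empty).contains k = true := by
    rw [PySem.Dict.contains_eq_decide_mem_keys, hkeys]; simpa using hkmem
  have hinv := pvAloop_getD l k PySem.Dict.empty PySem.Dict.empty PySem.Dict.empty
    (by simp [PySem.Dict.contains_empty]) (by simp [PySem.Dict.get?_empty])
  rw [hinv.1 hc]
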